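-- pv_equiv track=rewrite | github.com/tomstagg/workout-maths | backend/app/routers/quiz.py | compute_scoring
-- ===== SOURCE A (Python) =====
-- EASY_TABLES = {2, 5, 10}
--
-- MEDIUM_TABLES = {3, 4, 6, 8, 9}
--
-- def points_for_table(table: int) -> int:
--     if table in EASY_TABLES:
--         return 1
--     if table in MEDIUM_TABLES:
--         return 2
--     return 3  # hard
--
-- def compute_scoring(answers: list) -> tuple[int, int, int, int]:
--     """Returns (base_points, streak_bonus, total_points, max_streak)."""
--     base_points = 0
--     streak = 0
--     max_streak = 0
--     streak_bonus = 0
--     streak_milestones_hit: set[int] = set()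
--
--     for ans in answers:
--         if ans["is_correct"]:
--             base_points += points_for_table(ans["table_number"])
--             streak += 1
--             max_streak = max(max_streak, streak)
--
--             # Apply streak bonuses (cumulative)
--             if streak >= 3 and 3 not in streak_milestones_hit:
--                 streak_bonus += 5
--                 streak_milestones_hit.add(3)
--             if streak >= 5 and 5 not in streak_milestones_hit:
--                 streak_bonus += 10
--                 streak_milestones_hit.add(5)
--             if streak >= 10 and 10 not in streak_milestones_hit:
--                 streak_bonus += 25
--                 streak_milestones_hit.add(10)
--         else:
--             streak = 0
--             streak_milestones_hit.clear()
--
--     return base_points, streak_bonus, base_points + streak_bonus, max_streak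
-- ===== SOURCE B (Python) =====
-- _POINTS = {2: 1, 5: 1, 10: 1, 3: 2, 4: 2, 6: 2, 8: 2, 9: 2}
--
-- def _run_bonus(length):
--     return (5 if length >= 3 else 0) + (10 if length >= 5 else 0) + (25 if length >= 10 else 0)
--
-- def compute_scoring(answers: list) -> tuple[int, int, int, int]:
--     """Returns (base_points, streak_bonus, total_points, max_streak)."""
--     base_points = 0
--     streak_bonus = 0
--     max_streak = 0
--     i = 0
--     n = len(answers)
--     while i < n:
--         if not answers[i]["is_correct"]:
--             i += 1
--             continue
--         # maximal run of consecutive correct answers starting at i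
--         j = i
--         run_points = 0
--         while j < n and answers[j]["is_correct"]:
--             run_points += _POINTS.get(answers[j]["table_number"], 3)
--             j += 1
--         length = j - i
--         base_points += run_points
--         max_streak = max(max_streak, length)
--         streak_bonus += _run_bonus(length)
--         i = j
--     return base_points, streak_bonus, base_points + streak_bonus, max_streak
-- ===== Notes on version B (the rewrite author's own statement) =====
-- stated objective: alternative
-- what changed: B replaces A's per-answer state machine (streak counter plus a milestone set mutated on every answer) by a run decomposition: it splits the answers into maximal runs of consecutive correct answers and scores each run at once (sum of points, threshold bonuses from the run length, max run length), with a dict point table instead of two set lookups.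
import Mathlib
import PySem

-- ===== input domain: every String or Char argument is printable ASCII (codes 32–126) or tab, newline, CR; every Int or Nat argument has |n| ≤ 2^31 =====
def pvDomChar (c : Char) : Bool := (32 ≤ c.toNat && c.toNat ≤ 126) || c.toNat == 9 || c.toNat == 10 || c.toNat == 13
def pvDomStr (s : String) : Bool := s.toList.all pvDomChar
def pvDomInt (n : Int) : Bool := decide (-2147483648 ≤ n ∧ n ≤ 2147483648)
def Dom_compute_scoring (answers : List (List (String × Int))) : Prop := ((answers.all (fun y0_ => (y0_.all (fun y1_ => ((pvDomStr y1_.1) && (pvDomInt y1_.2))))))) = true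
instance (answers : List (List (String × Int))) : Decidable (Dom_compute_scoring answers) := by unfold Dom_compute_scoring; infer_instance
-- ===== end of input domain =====

-- B re-groups A's per-answer loop into maximal runs of consecutive correct answers and scores
-- each run at once (objective: alternative decomposition, same cost); return values proved equal on Pre_.

-- ===== PORT A =====
def points_for_table (table : Int) : Int :=
  if [(2 : Int), 5, 10].contains table then 1
  else if [(3 : Int), 4, 6, 8, 9].contains table then 2
  else 3

-- one iteration of A's for-loop; state = (base_points, streak, max_streak, streak_bonus, milestones)
def stepA (st : Int × Int × Int × Int × PySem.Set Int) (ans : List (String × Int)) :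
    Int × Int × Int × Int × PySem.Set Int :=
  let (b, s, m, sb, hit) := st
  if (PySem.Dict.mk ans).getD "is_correct" 0 ≠ 0 then
    let b := b + points_for_table ((PySem.Dict.mk ans).getD "table_number" 0)
    let s := s + 1
    let m := max m s
    let sb := if s ≥ 3 ∧ ¬ (3 : Int) ∈ hit then sb + 5 else sb
    let hit := if s ≥ 3 ∧ ¬ (3 : Int) ∈ hit then hit.add 3 else hit
    let sb := if s ≥ 5 ∧ ¬ (5 : Int) ∈ hit then sb + 10 else sb
    let hit := if s ≥ 5 ∧ ¬ (5 : Int) ∈ hit then hit.add 5 else hit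
    let sb := if s ≥ 10 ∧ ¬ (10 : Int) ∈ hit then sb + 25 else sb
    let hit := if s ≥ 10 ∧ ¬ (10 : Int) ∈ hit then hit.add 10 else hit
    (b, s, m, sb, hit)
  else
    (b, 0, m, sb, PySem.Set.empty)

def compute_scoring (answers : List (List (String × Int))) : Int × Int × Int × Int :=
  let st := answers.foldl stepA (0, 0, 0, 0, PySem.Set.empty)
  (st.1, st.2.2.2.1, st.1 + st.2.2.2.1, st.2.2.1)

-- ===== PORT B =====
def pointsB (table : Int) : Int :=
  (PySem.Dict.mk [((2 : Int), (1 : Int)), (5, 1), (10, 1), (3, 2), (4, 2), (6, 2), (8, 2), (9, 2)]).getD table 3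

def run_bonus (length : Int) : Int :=
  (if length ≥ 3 then 5 else 0) + (if length ≥ 5 then 10 else 0) + (if length ≥ 10 then 25 else 0)

def isCorr (ans : List (String × Int)) : Bool := (PySem.Dict.mk ans).getD "is_correct" 0 != 0

-- run-based single pass: returns (base_points, streak_bonus, max_streak)
def scanRuns : List (List (String × Int)) → Int × Int × Int
  | [] => (0, 0, 0)
  | x :: rest =>
    if isCorr x then
      -- maximal run of consecutive correct answers = x :: rest.takeWhile isCorr
      let run := rest.takeWhile isCorr
      let rest' := rest.dropWhile isCorr
      let pts := pointsB ((PySem.Dict.mk x).getD "table_number" 0)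
                   + (run.map (fun a => pointsB ((PySem.Dict.mk a).getD "table_number" 0))).sum
      let len : Int := 1 + run.length
      let r := scanRuns rest'
      (pts + r.1, run_bonus len + r.2.1, max len r.2.2)
    else
      scanRuns rest
  termination_by xs => xs.length
  decreasing_by
  · exact Nat.lt_succ_of_le (rest.length_dropWhile_le isCorr)
  · exact Nat.lt_succ_of_le (Nat.le_refl _)

def compute_scoring_alt (answers : List (List (String × Int))) : Int × Int × Int × Int :=
  let r := scanRuns answers
  (r.1, r.2.1, r.1 + r.2.1, r.2.2)

-- ===== PRECONDITION & SPEC =====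
-- Pre_ excludes exactly the inputs on which Python A raises KeyError: an answer dict without the
-- "is_correct" key, or a correct answer without the "table_number" key.
def Pre_compute_scoring (answers : List (List (String × Int))) : Prop :=
  ∀ ans ∈ answers, ((PySem.Dict.mk ans).get? "is_correct").isSome = true ∧
    ((PySem.Dict.mk ans).getD "is_correct" 0 ≠ 0 → ((PySem.Dict.mk ans).get? "table_number").isSome = true)
instance (answers : List (List (String × Int))) : Decidable (Pre_compute_scoring answers) := by
  unfold Pre_compute_scoring; infer_instance

def pvWitness_compute_scoring : (List (List (String × Int))) :=
  [[("is_correct", 1), ("table_number", 2)], [("is_correct", 0)], [("is_correct", 1), ("table_number", 7)]]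

def Spec_compute_scoring (answers : List (List (String × Int))) (out : Int × Int × Int × Int) : Prop := out = compute_scoring_alt answers
instance (answers : List (List (String × Int))) (out : Int × Int × Int × Int) : Decidable (Spec_compute_scoring answers out) := by unfold Spec_compute_scoring; infer_instance

-- ===== CLAIM (what is proved, stated in full; the proofs are below) =====
def Claim_equal_compute_scoring : Prop := ∀ (answers : List (List (String × Int))), Dom_compute_scoring answers → Pre_compute_scoring answers → Spec_compute_scoring answers (compute_scoring answers)

-- ===== LEMMAS AND PROOFS =====

-- the two point tables agree
theorem pointsB_eq (t : Int) : pointsB t = points_for_table t := by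
  by_cases h2 : (2:Int) = t; · subst h2; decide
  by_cases h3 : (3:Int) = t; · subst h3; decide
  by_cases h4 : (4:Int) = t; · subst h4; decide
  by_cases h5 : (5:Int) = t; · subst h5; decide
  by_cases h6 : (6:Int) = t; · subst h6; decide
  by_cases h8 : (8:Int) = t; · subst h8; decide
  by_cases h9 : (9:Int) = t; · subst h9; decide
  by_cases h10 : (10:Int) = t; · subst h10; decide
  simp [pointsB, points_for_table, PySem.Dict.getD_eq_get?_getD, PySem.Dict.get?, beq_iff_eq, h2, h3, h4, h5, h6, h8, h9, h10,
    Ne.symm h2, Ne.symm h3, Ne.symm h4, Ne.symm h5, Ne.symm h6, Ne.symm h8, Ne.symm h9, Ne.symm h10]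

-- invariant linking A's milestone set to the current streak
def HitInv (s : Int) (hit : PySem.Set Int) : Prop :=
  ((3 : Int) ∈ hit ↔ 3 ≤ s) ∧ ((5 : Int) ∈ hit ↔ 5 ≤ s) ∧ ((10 : Int) ∈ hit ↔ 10 ≤ s)

-- one correct step of A, seen through the projections (base, streak, max, bonus) plus the invariant
set_option maxHeartbeats 1000000 in
theorem stepA_correct (a : List (String × Int)) (ha : isCorr a = true)
    (b s m sb : Int) (hit : PySem.Set Int) (hinv : HitInv s hit) :
    (stepA (b, s, m, sb, hit) a).1 = b + points_for_table ((PySem.Dict.mk a).getD "table_number" 0) ∧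
    (stepA (b, s, m, sb, hit) a).2.1 = s + 1 ∧
    (stepA (b, s, m, sb, hit) a).2.2.1 = max m (s + 1) ∧
    (stepA (b, s, m, sb, hit) a).2.2.2.1 = sb + run_bonus (s + 1) - run_bonus s ∧
    HitInv (s + 1) (stepA (b, s, m, sb, hit) a).2.2.2.2 := by
  have hc : ((PySem.Dict.mk a).getD "is_correct" 0 ≠ 0) := by
    simpa [isCorr] using ha
  obtain ⟨i3, i5, i10⟩ := hinv
  simp only [stepA, if_pos hc, HitInv, run_bonus]
  clear ha hc
  have n53 : ¬((5:Int) = 3) := by norm_num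
  have n103 : ¬((10:Int) = 3) := by norm_num
  have n105 : ¬((10:Int) = 5) := by norm_num
  have n35 : ¬((3:Int) = 5) := by norm_num
  have n310 : ¬((3:Int) = 10) := by norm_num
  have n510 : ¬((5:Int) = 10) := by norm_num
  split_ifs <;>
    simp only [PySem.Set.mem_add, i3, i5, i10, true_and, or_true,
      n53, n103, n105, n35, n310, n510, true_iff, or_false, not_false_iff] at * <;>
    omega

-- folding A's step over a list of all-correct answers
theorem foldA_run (r : List (List (String × Int))) (hr : ∀ a ∈ r, isCorr a = true) :
    ∀ (b s m sb : Int) (hit : PySem.Set Int), s ≤ m → HitInv s hit →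
    (List.foldl stepA (b, s, m, sb, hit) r).1 = b + (r.map (fun a => points_for_table ((PySem.Dict.mk a).getD "table_number" 0))).sum ∧
    (List.foldl stepA (b, s, m, sb, hit) r).2.1 = s + r.length ∧
    (List.foldl stepA (b, s, m, sb, hit) r).2.2.1 = max m (s + r.length) ∧
    (List.foldl stepA (b, s, m, sb, hit) r).2.2.2.1 = sb + run_bonus (s + r.length) - run_bonus s ∧
    HitInv (s + r.length) (List.foldl stepA (b, s, m, sb, hit) r).2.2.2.2 := by
  induction r with
  | nil =>
    intro b s m sb hit hsm hinv
    refine ⟨by simp, by simp, by simp; omega, by simp, by simpa using hinv⟩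
  | cons a r ih =>
    intro b s m sb hit hsm hinv
    have ha : isCorr a = true := hr a (by simp)
    have hr' : ∀ a ∈ r, isCorr a = true := fun a h => hr a (by simp [h])
    obtain ⟨e1, e2, e3, e4, hinv'⟩ := stepA_correct a ha b s m sb hit hinv
    rcases hst : stepA (b, s, m, sb, hit) a with ⟨b', s', m', sb', hit'⟩
    rw [hst] at e1 e2 e3 e4 hinv'
    simp only at e1 e2 e3 e4 hinv'
    subst e1 e2 e3 e4
    obtain ⟨f1, f2, f3, f4, hinv''⟩ :=
      ih hr' (b + points_for_table ((PySem.Dict.mk a).getD "table_number" 0)) (s + 1)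
        (max m (s + 1)) (sb + run_bonus (s + 1) - run_bonus s) hit' (le_max_right m (s + 1)) hinv'
    rw [List.foldl_cons, hst]
    have hlen : ((r.length + 1 : Nat) : Int) = ((r.length : Int) + 1) := by push_cast; ring
    have harg : s + 1 + (r.length : Int) = s + ((r.length : Int) + 1) := by ring
    refine ⟨?_, ?_, ?_, ?_, ?_⟩
    · rw [f1]; simp [List.sum_cons]; ring
    · rw [f2, List.length_cons, hlen]; ring
    · rw [f3, List.length_cons, hlen, harg]; omega
    · rw [f4, List.length_cons, hlen, harg]; ring
    · rw [List.length_cons, hlen, ← harg]; exact hinv''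

-- the tail after dropWhile is empty or starts with a failing element
theorem dropWhile_shape {α : Type} (p : α → Bool) (l : List α) :
    l.dropWhile p = [] ∨ ∃ y t, l.dropWhile p = y :: t ∧ p y = false := by
  induction l with
  | nil => exact Or.inl rfl
  | cons x xs ih =>
    by_cases hx : p x
    · rw [List.dropWhile_cons_of_pos hx]; exact ih
    · rw [List.dropWhile_cons_of_neg hx]
      exact Or.inr ⟨x, xs, rfl, by simpa using hx⟩

-- the projections of A's fold do not depend on the incoming streak/milestones when the
-- remaining list is empty or starts with an incorrect answer
theorem foldl_proj_clean (ys : List (List (String × Int)))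
    (hy : ys = [] ∨ ∃ y t, ys = y :: t ∧ isCorr y = false)
    (b1 s1 m1 sb1 : Int) (hit1 : PySem.Set Int) :
    ((List.foldl stepA (b1, s1, m1, sb1, hit1) ys).1,
     (List.foldl stepA (b1, s1, m1, sb1, hit1) ys).2.2.1,
     (List.foldl stepA (b1, s1, m1, sb1, hit1) ys).2.2.2.1)
    = ((List.foldl stepA (b1, 0, m1, sb1, PySem.Set.empty) ys).1,
       (List.foldl stepA (b1, 0, m1, sb1, PySem.Set.empty) ys).2.2.1,
       (List.foldl stepA (b1, 0, m1, sb1, PySem.Set.empty) ys).2.2.2.1) := by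
  rcases hy with h | ⟨y, t, h, hcy⟩
  · subst h; rfl
  · subst h
    have hcy' : (PySem.Dict.mk y).getD "is_correct" 0 = 0 := by
      by_contra hne
      simp [isCorr, hne] at hcy
    rw [List.foldl_cons, List.foldl_cons]
    have : ∀ (s : Int) (hit : PySem.Set Int),
        stepA (b1, s, m1, sb1, hit) y = (b1, 0, m1, sb1, PySem.Set.empty) := by
      intro s hit
      simp only [stepA, if_neg (show ¬ ((PySem.Dict.mk y).getD "is_correct" 0 ≠ 0) by simpa using hcy')]
    rw [this s1 hit1, this 0 PySem.Set.empty]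

-- main invariant: A's fold from a fresh streak computes B's run scan
theorem scan_eq (xs : List (List (String × Int))) :
    ∀ (b m sb : Int), 0 ≤ m →
    (List.foldl stepA (b, 0, m, sb, PySem.Set.empty) xs).1 = b + (scanRuns xs).1 ∧
    (List.foldl stepA (b, 0, m, sb, PySem.Set.empty) xs).2.2.1 = max m (scanRuns xs).2.2 ∧
    (List.foldl stepA (b, 0, m, sb, PySem.Set.empty) xs).2.2.2.1 = sb + (scanRuns xs).2.1 := by
  induction xs using scanRuns.induct with
  | case1 =>
    intro b m sb hm
    refine ⟨by simp [scanRuns], by simp [scanRuns]; omega, by simp [scanRuns]⟩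
  | case2 x rest hx rest' ih =>
    intro b m sb hm
    have hinv0 : HitInv 0 PySem.Set.empty := by
      refine ⟨?_, ?_, ?_⟩ <;> simp [PySem.Set.empty]
    have hall : ∀ a ∈ x :: rest.takeWhile isCorr, isCorr a = true := by
      intro a haa
      rcases List.mem_cons.mp haa with h | h
      · subst h; exact hx
      · exact List.mem_takeWhile_imp h
    have hsplit : x :: rest = (x :: rest.takeWhile isCorr) ++ rest.dropWhile isCorr := by
      simp
    obtain ⟨g1, g2, g3, g4, hinvr⟩ :=
      foldA_run (x :: rest.takeWhile isCorr) hall b 0 m sb PySem.Set.empty hm hinv0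
    rcases hst : List.foldl stepA (b, 0, m, sb, PySem.Set.empty) (x :: rest.takeWhile isCorr)
      with ⟨b1, s1, m1, sb1, hit1⟩
    rw [hst] at g1 g2 g3 g4
    simp only at g1 g2 g3 g4
    have hproj := foldl_proj_clean (rest.dropWhile isCorr)
      (dropWhile_shape isCorr rest) b1 s1 m1 sb1 hit1
    have p1 := congrArg (fun t : Int × Int × Int => t.1) hproj
    have p2 := congrArg (fun t : Int × Int × Int => t.2.1) hproj
    have p3 := congrArg (fun t : Int × Int × Int => t.2.2) hproj
    simp only at p1 p2 p3
    have hm1 : (0 : Int) ≤ m1 := by rw [g3]; omega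
    obtain ⟨q1, q2, q3⟩ := ih b1 m1 sb1 hm1
    have hL : ((( x :: rest.takeWhile isCorr).length : Nat) : Int)
        = 1 + ((rest.takeWhile isCorr).length : Int) := by simp; ring
    have hb0 : run_bonus 0 = 0 := by norm_num [run_bonus]
    have hscan : scanRuns (x :: rest) =
        (pointsB ((PySem.Dict.mk x).getD "table_number" 0)
            + ((rest.takeWhile isCorr).map (fun a => pointsB ((PySem.Dict.mk a).getD "table_number" 0))).sum
            + (scanRuns (rest.dropWhile isCorr)).1,
         run_bonus (1 + ((rest.takeWhile isCorr).length : Int)) + (scanRuns (rest.dropWhile isCorr)).2.1,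
         max (1 + ((rest.takeWhile isCorr).length : Int)) (scanRuns (rest.dropWhile isCorr)).2.2) := by
      simp only [scanRuns, hx, if_true]
    rw [hscan, hsplit, List.foldl_append, hst]
    simp only
    refine ⟨?_, ?_, ?_⟩
    · rw [p1, q1, g1]
      simp [pointsB_eq, List.sum_cons]
      ring
    · rw [p2, q2, g3]
      simp only [hL, zero_add]
      rw [max_assoc]
    · rw [p3, q3, g4]
      simp only [hL, hb0, zero_add]
      ring
  | case3 x rest hx ih =>
    intro b m sb hm
    have hcx : (PySem.Dict.mk x).getD "is_correct" 0 = 0 := by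
      by_contra hne
      simp [isCorr, hne] at hx
    have hstep : stepA (b, 0, m, sb, PySem.Set.empty) x = (b, 0, m, sb, PySem.Set.empty) := by
      simp only [stepA, if_neg (show ¬ ((PySem.Dict.mk x).getD "is_correct" 0 ≠ 0) by simpa using hcx)]
    have hscan : scanRuns (x :: rest) = scanRuns rest := by
      simp only [scanRuns]
      rw [if_neg (by simpa using hx)]
    rw [List.foldl_cons, hstep, hscan]
    exact ih b m sb hm

-- B's max_streak is never negative
theorem scanRuns_max_nonneg (xs : List (List (String × Int))) : 0 ≤ (scanRuns xs).2.2 := by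
  induction xs using scanRuns.induct with
  | case1 => simp [scanRuns]
  | case2 x rest hx rest' ih =>
    simp only [scanRuns, hx, if_true]
    have h0 : (0:Int) ≤ 1 + ((rest.takeWhile isCorr).length : Int) := by positivity
    exact le_trans h0 (le_max_left _ _)
  | case3 x rest hx ih =>
    have hscan : scanRuns (x :: rest) = scanRuns rest := by
      simp only [scanRuns]
      rw [if_neg (by simpa using hx)]
    rw [hscan]; exact ih

-- ===== VERDICT (by name: the statement is the Claim_ definition above) =====
theorem compute_scoring_spec : Claim_equal_compute_scoring := by
  intro answers _ _
  unfold Spec_compute_scoring compute_scoring compute_scoring_alt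
  obtain ⟨e1, e2, e3⟩ := scan_eq answers 0 0 0 (le_refl 0)
  have hmn := scanRuns_max_nonneg answers
  simp only at e1 e2 e3 ⊢
  rw [e1, e2, e3]
  simp only [zero_add]
  have : max (0 : Int) (scanRuns answers).2.2 = (scanRuns answers).2.2 := by omega
  rw [this]
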